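-- pv_equiv track=rewrite | github.com/pypi-data/pypi-mirror-357 | packages/ipfs-kit-py/ipfs_kit_py-0.3.0-py3-none-any.whl/ipfs_kit_py/validation.py | is_safe_command_arg
-- ===== SOURCE A (Python) =====
-- COMMAND_INJECTION_PATTERNS = [
--     ";",
--     "&",
--     "|",
--     ">",
--     "<",
--     "`",
--     "$",
--     "(",
--     ")",
--     "{",
--     "}",
--     "[",
--     "]",
--     "&&",
--     "||",
--     "\\",
--     "\n",
--     "\r",
--     "\t",
--     "\v",
--     "\f",
--     "\0",
-- ]
--
-- DANGEROUS_COMMANDS = [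
--     "rm",
--     "chown",
--     "chmod",
--     "exec",
--     "eval",
--     "source",
--     "curl",
--     "wget",
--     "bash",
--     "sh",
--     "sudo",
--     "su",
-- ]
--
-- def is_safe_command_arg(arg: str) -> bool:
--     """
--     Check if a command argument is safe to use without raising exceptions.
--
--     Args:
--         arg: Command argument to check
--
--     Returns:
--         True if argument is safe, False otherwise
--     """
--     if not arg or not isinstance(arg, str):
--         return False
--
--     # Check for shell injection patterns
--     for pattern in COMMAND_INJECTION_PATTERNS:
--         if pattern in arg:
--             return False
--
--     # Check for commands that could be dangerous
--     for cmd in DANGEROUS_COMMANDS: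
--         if arg == cmd or arg.startswith(cmd + " "):
--             return False
--
--     return True
-- ===== SOURCE B (Python) =====
-- BAD_CHARS = set(";&|><`$(){}[]\\\n\r\t\v\f\0")
-- DANGEROUS = {"rm", "chown", "chmod", "exec", "eval", "source",
--              "curl", "wget", "bash", "sh", "sudo", "su"}
--
-- def is_safe_command_arg(arg: str) -> bool:
--     if not arg or not isinstance(arg, str):
--         return False
--     if any(c in BAD_CHARS for c in arg):
--         return False
--     return arg.split(' ', 1)[0] not in DANGEROUS
-- ===== Notes on version B (the rewrite author's own statement) =====
-- stated objective: idiomatic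
-- what changed: One pass over the characters against a set of bad characters (the multi-char patterns '&&'/'||' are subsumed by '&'/'|') plus a single set lookup of the leading space-delimited token, instead of one substring scan per pattern and one equality/startswith test per dangerous command.
import Mathlib
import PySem

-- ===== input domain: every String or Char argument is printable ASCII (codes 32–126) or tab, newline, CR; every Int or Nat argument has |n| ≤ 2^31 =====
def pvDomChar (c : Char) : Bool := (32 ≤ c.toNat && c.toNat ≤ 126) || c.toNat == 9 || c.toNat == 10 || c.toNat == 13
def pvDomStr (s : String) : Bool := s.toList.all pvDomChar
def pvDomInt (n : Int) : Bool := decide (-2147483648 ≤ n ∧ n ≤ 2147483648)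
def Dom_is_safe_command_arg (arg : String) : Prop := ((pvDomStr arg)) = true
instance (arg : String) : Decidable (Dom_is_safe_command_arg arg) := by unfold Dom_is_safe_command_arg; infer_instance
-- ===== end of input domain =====

-- B replaces the per-pattern substring scans by one pass over arg's characters against a set
-- of bad characters ('&&'/'||' are subsumed by '&'/'|') and a single lookup of the leading
-- space-delimited token in a set of dangerous commands (idiomatic; not claimed faster).

-- ===== PORT A =====
def pvPatterns : List (List Char) :=
  [[';'], ['&'], ['|'], ['>'], ['<'], ['`'], ['$'], ['('], [')'], ['{'], ['}'],
   ['['], [']'], ['&','&'], ['|','|'], ['\\'], ['\n'], ['\r'], ['\t'],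
   [Char.ofNat 11], [Char.ofNat 12], [Char.ofNat 0]]

def pvDangerous : List (List Char) :=
  ["rm", "chown", "chmod", "exec", "eval", "source", "curl", "wget",
   "bash", "sh", "sudo", "su"].map String.toList

def is_safe_command_arg (arg : String) : Bool :=
  let cs := arg.toList
  if cs = [] then false   -- 'not arg'
  else if pvPatterns.any (fun p => PySem.Chars.isIn p cs) then false
  else if pvDangerous.any (fun cmd => cs = cmd || PySem.Chars.startswith cs (cmd ++ [' '])) then false
  else true

-- ===== PORT B =====
def pvBadChars : PySem.Set Char :=
  PySem.Set.ofList
    [';', '&', '|', '>', '<', '`', '$', '(', ')', '{', '}', '[', ']', '\\',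
     '\n', '\r', '\t', Char.ofNat 11, Char.ofNat 12, Char.ofNat 0]

def pvDangerSet : PySem.Set (List Char) :=
  PySem.Set.ofList (["rm", "chown", "chmod", "exec", "eval", "source", "curl",
                     "wget", "bash", "sh", "sudo", "su"].map String.toList)

def is_safe_command_arg_alt (arg : String) : Bool :=
  let cs := arg.toList
  if cs = [] then false
  else if cs.any (fun c => PySem.Set.contains pvBadChars c) then false
  else !(PySem.Set.contains pvDangerSet (cs.takeWhile (fun c => c ≠ ' ')))
    -- arg.split(' ', 1)[0] is exactly the characters before the first ' '

-- ===== PRECONDITION & SPEC =====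
def Spec_is_safe_command_arg (arg : String) (out : Bool) : Prop := out = is_safe_command_arg_alt arg
instance (arg : String) (out : Bool) : Decidable (Spec_is_safe_command_arg arg out) := by unfold Spec_is_safe_command_arg; infer_instance

-- ===== CLAIM (what is proved, stated in full; the proofs are below) =====
def Claim_equal_is_safe_command_arg : Prop := ∀ (arg : String), Dom_is_safe_command_arg arg → Spec_is_safe_command_arg arg (is_safe_command_arg arg)

-- ===== LEMMAS AND PROOFS =====

-- the single-character alphabet behind pvPatterns
def pvBadList : List Char :=
  [';', '&', '|', '>', '<', '`', '$', '(', ')', '{', '}', '[', ']', '\\',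
   '\n', '\r', '\t', Char.ofNat 11, Char.ofNat 12, Char.ofNat 0]

lemma singleton_infix_iff {α : Type} (x : α) (cs : List α) : [x] <:+: cs ↔ x ∈ cs := by
  constructor
  · intro h; exact h.subset (List.mem_singleton_self x)
  · intro h
    obtain ⟨s, t, rfl⟩ := List.append_of_mem h
    exact ⟨s, t, by simp⟩

lemma contains_badChars_iff (c : Char) :
    PySem.Set.contains pvBadChars c = true ↔ c ∈ pvBadList := by
  constructor
  · intro h
    simp only [pvBadChars, PySem.Set.contains, PySem.Set.ofList, PySem.Set.empty_eq,
      List.foldl_cons, List.not_mem_nil, not_false_eq_true, PySem.Set.add_of_not_mem,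
      List.nil_append, List.mem_cons, Char.reduceEq, or_self, List.cons_append, List.foldl_nil,
      List.contains_eq_mem, or_false, Bool.decide_or, Bool.or_eq_true, decide_eq_true_eq] at h
    simp only [pvBadList, List.mem_cons, List.not_mem_nil, or_false]
    tauto
  · intro h
    simp only [pvBadList, List.mem_cons, List.not_mem_nil, or_false] at h
    rcases h with h|h|h|h|h|h|h|h|h|h|h|h|h|h|h|h|h|h|h|h <;> subst h <;> decide

lemma pattern_scan_eq_char_scan (cs : List Char) :
    pvPatterns.any (fun p => PySem.Chars.isIn p cs) = cs.any (fun c => PySem.Set.contains pvBadChars c) := by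
  rw [Bool.eq_iff_iff]
  simp only [List.any_eq_true, PySem.Chars.isIn_iff_infix, contains_badChars_iff]
  constructor
  · rintro ⟨p, hp, hinf⟩
    simp only [pvPatterns, List.mem_cons, List.not_mem_nil, or_false] at hp
    rcases hp with h|h|h|h|h|h|h|h|h|h|h|h|h|h|h|h|h|h|h|h|h|h <;> subst h
    all_goals first
      | (exact ⟨_, (singleton_infix_iff _ cs).mp hinf, by decide⟩)
      | (exact ⟨_, hinf.subset (List.mem_cons_self), by decide⟩)
  · rintro ⟨c, hc, hbad⟩
    refine ⟨[c], ?_, (singleton_infix_iff c cs).mpr hc⟩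
    simp only [pvBadList, List.mem_cons, List.not_mem_nil, or_false] at hbad
    rcases hbad with h|h|h|h|h|h|h|h|h|h|h|h|h|h|h|h|h|h|h|h <;> subst h <;> decide

lemma no_space_in_dangerous : ∀ cmd ∈ pvDangerous, ' ' ∉ cmd := by decide

lemma takeWhile_no_space {cmd : List Char} (hsp : ' ' ∉ cmd) :
    cmd.takeWhile (fun c => decide (c ≠ ' ')) = cmd := by
  rw [List.takeWhile_eq_self_iff]
  intro a ha
  simp only [ne_eq, decide_eq_true_eq]
  intro h; exact hsp (h ▸ ha)

lemma first_token_eq {cmd cs : List Char} (hsp : ' ' ∉ cmd) :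
    (cs = cmd ∨ (cmd ++ [' ']) <+: cs) ↔ cs.takeWhile (fun c => c ≠ ' ') = cmd := by
  constructor
  · rintro (rfl | ⟨t, rfl⟩)
    · exact takeWhile_no_space hsp
    · rw [List.append_assoc, List.takeWhile_append, if_pos (by rw [takeWhile_no_space hsp])]
      simp
  · intro h
    have hsplit := (List.takeWhile_append_dropWhile (p := fun c => (c ≠ ' ' : Bool)) (l := cs)).symm
    rw [h] at hsplit
    rcases hd : cs.dropWhile (fun c => (c ≠ ' ' : Bool)) with _ | ⟨a, t⟩
    · left; rw [hsplit, hd, List.append_nil]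
    · have ha : a = ' ' := by
        have := List.head_dropWhile_not (p := fun c => (c ≠ ' ' : Bool)) (l := cs)
        rw [hd] at this; simpa using this (by simp)
      right; exact ⟨t, by rw [hsplit, hd, ha]; simp⟩

lemma command_scan_eq_token_lookup (cs : List Char) :
    pvDangerous.any (fun cmd => cs = cmd || PySem.Chars.startswith cs (cmd ++ [' '])) =
      PySem.Set.contains pvDangerSet (cs.takeWhile (fun c => c ≠ ' ')) := by
  rw [Bool.eq_iff_iff]
  have hset : ∀ x, PySem.Set.contains pvDangerSet x = true ↔ x ∈ pvDangerous := by
    intro x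
    simp [pvDangerSet, pvDangerous, PySem.Set.contains, PySem.Set.ofList, List.contains_eq_mem]
  rw [hset]
  simp only [List.any_eq_true, Bool.or_eq_true, decide_eq_true_eq, PySem.Chars.startswith_iff]
  constructor
  · rintro ⟨cmd, hcmd, hor⟩
    rw [(first_token_eq (no_space_in_dangerous cmd hcmd)).mp hor]
    exact hcmd
  · intro h
    exact ⟨_, h, (first_token_eq (no_space_in_dangerous _ h)).mpr rfl⟩

-- ===== VERDICT (by name: the statement is the Claim_ definition above) =====
theorem is_safe_command_arg_spec : Claim_equal_is_safe_command_arg := by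
  intro arg _
  unfold Spec_is_safe_command_arg is_safe_command_arg is_safe_command_arg_alt
  simp only [pattern_scan_eq_char_scan, command_scan_eq_token_lookup]
  split_ifs <;> simp_all
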